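-- pv_equiv track=rewrite | github.com/syrusminer/sequence-processing-intro | Exercise_1.py | findingSNP
-- ===== SOURCE A (Python) =====
-- def findingSNP(DNAstrands):
--     snp_counter = 0
--     strand_length = len(next(iter(DNAstrands.values())))
--
--     for i in range(strand_length):
--         nucleotides = []
--
--         for strand in DNAstrands.values():
--             currentNuc = strand[i]
--             nucleotides.append(currentNuc)
--
--         if len(set(nucleotides)) > 1:
--             snp_counter +=1
--
--     return snp_counter
-- ===== SOURCE B (Python) =====
-- def findingSNP(DNAstrands):
--     reference = next(iter(DNAstrands.values()))
--     strand_length = len(reference)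
--     snp_positions = set()
--     for strand in DNAstrands.values():
--         for i in range(strand_length):
--             if strand[i] != reference[i]:
--                 snp_positions.add(i)
--     return len(snp_positions)
-- ===== Notes on version B (the rewrite author's own statement) =====
-- stated objective: alternative
-- what changed: Transposed traversal: strands outer / positions inner, maintaining one set of differing positions against the first strand instead of rebuilding a per-column nucleotide set for every position.
import Mathlib
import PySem

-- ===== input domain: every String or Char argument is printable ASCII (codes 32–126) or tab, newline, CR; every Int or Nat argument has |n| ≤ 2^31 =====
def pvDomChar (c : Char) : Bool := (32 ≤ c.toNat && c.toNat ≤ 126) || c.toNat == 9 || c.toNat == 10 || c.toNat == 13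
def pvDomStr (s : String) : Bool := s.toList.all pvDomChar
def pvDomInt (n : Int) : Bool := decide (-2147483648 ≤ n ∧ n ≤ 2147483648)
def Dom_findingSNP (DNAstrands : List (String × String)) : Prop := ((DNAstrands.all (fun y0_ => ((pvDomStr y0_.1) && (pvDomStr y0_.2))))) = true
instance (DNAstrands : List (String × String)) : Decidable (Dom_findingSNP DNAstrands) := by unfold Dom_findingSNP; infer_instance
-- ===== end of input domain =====

-- B replaces A's position-major loop (rebuilding a nucleotide set per column) with a
-- strand-major loop collecting the set of positions that differ from the first strand.

-- ===== PORT A =====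
def findingSNP (DNAstrands : List (String × String)) : Int :=
  let vals : List (List Char) := ((PySem.Dict.ofList DNAstrands).values).map String.toList
  let strand_length : Int := ((vals.headD []).length : Int)
  (PySem.List.pyRange 0 strand_length 1).foldl (fun snp_counter i =>
    let nucleotides : List Char :=
      vals.foldl (fun acc strand => acc ++ [PySem.List.pyGetD strand i ' ']) []
    if 1 < (PySem.Set.ofList nucleotides).length then snp_counter + 1 else snp_counter) 0

-- ===== PORT B =====
def findingSNP_alt (DNAstrands : List (String × String)) : Int :=
  let vals : List (List Char) := ((PySem.Dict.ofList DNAstrands).values).map String.toList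
  match vals with
  | [] => 0  -- next(iter(...)) raises StopIteration here; excluded by Pre_
  | reference :: _ =>
    let strand_length : Int := (reference.length : Int)
    let snps : PySem.Set Int :=
      vals.foldl (fun s strand =>
        (PySem.List.pyRange 0 strand_length 1).foldl (fun s i =>
          if PySem.List.pyGetD strand i ' ' ≠ PySem.List.pyGetD reference i ' '
          then PySem.Set.add s i else s) s) PySem.Set.empty
    (snps.length : Int)

-- ===== PRECONDITION & SPEC =====
-- Pre_ excludes exactly the inputs where Python A raises: the empty dict (StopIteration
-- from next(iter(...))) and dicts containing a strand shorter than the first one (IndexError).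
def Pre_findingSNP (DNAstrands : List (String × String)) : Prop :=
  DNAstrands ≠ [] ∧
  ∀ s ∈ (PySem.Dict.ofList DNAstrands).values,
    ((PySem.Dict.ofList DNAstrands).values.headD "").toList.length ≤ s.toList.length
instance (DNAstrands : List (String × String)) : Decidable (Pre_findingSNP DNAstrands) := by
  unfold Pre_findingSNP; infer_instance
def pvWitness_findingSNP : (List (String × String)) := [("a", "ACGT"), ("b", "AGGT")]

def Spec_findingSNP (DNAstrands : List (String × String)) (out : Int) : Prop := out = findingSNP_alt DNAstrands
instance (DNAstrands : List (String × String)) (out : Int) : Decidable (Spec_findingSNP DNAstrands out) := by unfold Spec_findingSNP; infer_instance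

-- ===== CLAIM (what is proved, stated in full; the proofs are below) =====
def Claim_equal_findingSNP : Prop := ∀ (DNAstrands : List (String × String)), Dom_findingSNP DNAstrands → Pre_findingSNP DNAstrands → Spec_findingSNP DNAstrands (findingSNP DNAstrands)

-- ===== LEMMAS AND PROOFS =====

-- `len(set(c :: l)) > 1` iff some later element differs from the head
lemma pvSet_card_gt_one (c : Char) (l : List Char) :
    (1 < (PySem.Set.ofList (c :: l)).length) ↔ ∃ x ∈ l, x ≠ c := by
  rw [PySem.Set.ofList_cons]
  simp only [List.length_cons]
  constructor
  · intro h
    have hpos : 0 < (PySem.Set.discard (PySem.Set.ofList l) c).length := by omega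
    obtain ⟨x, hx⟩ := List.exists_mem_of_length_pos hpos
    rw [PySem.Set.mem_discard _ _ _] at hx
    exact ⟨x, (PySem.Set.mem_ofList _ _).mp hx.1, hx.2⟩
  · rintro ⟨x, hxl, hxc⟩
    have hx : x ∈ PySem.Set.discard (PySem.Set.ofList l) c :=
      (PySem.Set.mem_discard _ _ _).mpr ⟨(PySem.Set.mem_ofList _ _).mpr hxl, hxc⟩
    have := List.length_pos_of_mem hx
    omega

-- membership in B's nested fold
lemma pvB_fold_mem (ref : List Char) (n : Int) (vals : List (List Char))
    (s : PySem.Set Int) (j : Int) :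
    j ∈ vals.foldl (fun s strand =>
        (PySem.List.pyRange 0 n 1).foldl (fun s i =>
          if PySem.List.pyGetD strand i ' ' ≠ PySem.List.pyGetD ref i ' ' then PySem.Set.add s i else s) s) s ↔
      j ∈ s ∨ ∃ strand ∈ vals, j ∈ PySem.List.pyRange 0 n 1 ∧ PySem.List.pyGetD strand j ' ' ≠ PySem.List.pyGetD ref j ' ' := by
  induction vals generalizing s with
  | nil => simp
  | cons v vs ih =>
    simp only [List.foldl_cons]
    rw [ih]
    rw [PySem.List.foldl_ite_eq_foldl_filter
      (p := fun i => PySem.List.pyGetD v i ' ' ≠ PySem.List.pyGetD ref i ' ') (f := PySem.Set.add)]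
    have hupd : ((PySem.List.pyRange 0 n 1).filter
          (fun i => decide (PySem.List.pyGetD v i ' ' ≠ PySem.List.pyGetD ref i ' '))).foldl PySem.Set.add s
        = PySem.Set.update s ((PySem.List.pyRange 0 n 1).filter
          (fun i => decide (PySem.List.pyGetD v i ' ' ≠ PySem.List.pyGetD ref i ' '))) := rfl
    rw [hupd]
    simp only [PySem.Set.mem_update, List.mem_filter, decide_eq_true_eq, List.mem_cons]
    constructor
    · rintro (((h | h) | ⟨st, hst, h1, h2⟩))
      · exact Or.inl h
      · exact Or.inr ⟨v, Or.inl rfl, h.1, h.2⟩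
      · exact Or.inr ⟨st, Or.inr hst, h1, h2⟩
    · rintro (h | ⟨st, (rfl | hst), h1, h2⟩)
      · exact Or.inl (Or.inl h)
      · exact Or.inl (Or.inr ⟨h1, h2⟩)
      · exact Or.inr ⟨st, hst, h1, h2⟩

-- B's nested fold keeps the set duplicate-free
lemma pvB_fold_nodup (ref : List Char) (n : Int) (vals : List (List Char))
    (s : PySem.Set Int) (hs : s.Nodup) :
    (vals.foldl (fun s strand =>
        (PySem.List.pyRange 0 n 1).foldl (fun s i =>
          if PySem.List.pyGetD strand i ' ' ≠ PySem.List.pyGetD ref i ' ' then PySem.Set.add s i else s) s) s).Nodup := by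
  induction vals generalizing s with
  | nil => simpa
  | cons v vs ih =>
    simp only [List.foldl_cons]
    apply ih
    rw [PySem.List.foldl_ite_eq_foldl_filter
      (p := fun i => PySem.List.pyGetD v i ' ' ≠ PySem.List.pyGetD ref i ' ') (f := PySem.Set.add)]
    exact PySem.Set.nodup_update _ _ hs

-- the two ports agree on every input (Pre_ is only needed for faithfulness to the Python)
lemma pv_ports_eq (d : List (String × String)) : findingSNP d = findingSNP_alt d := by
  unfold findingSNP findingSNP_alt
  cases hv : ((PySem.Dict.ofList d).values).map String.toList with
  | nil =>
    simp
  | cons ref rest =>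
    simp only [List.headD_cons]
    -- A side: a counting fold
    have hA : ∀ (i : Int),
        (ref :: rest).foldl (fun acc strand => acc ++ [PySem.List.pyGetD strand i ' ']) []
          = (ref :: rest).map (fun strand => PySem.List.pyGetD strand i ' ') := by
      intro i
      simpa using PySem.List.foldl_append_singleton_eq_map
        (l := ref :: rest) (f := fun strand => PySem.List.pyGetD strand i ' ') (acc := [])
    have hAcount :
        (PySem.List.pyRange 0 ((ref.length : Int)) 1).foldl (fun snp_counter i =>
          if 1 < (PySem.Set.ofList ((ref :: rest).foldl
              (fun acc strand => acc ++ [PySem.List.pyGetD strand i ' ']) [])).length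
          then snp_counter + 1 else snp_counter) 0
        = ((PySem.List.pyRange 0 ((ref.length : Int)) 1).countP
            (fun i => decide (∃ x ∈ rest, PySem.List.pyGetD x i ' ' ≠ PySem.List.pyGetD ref i ' ')) : Int) := by
      have := PySem.List.foldl_ite_add_one
        (l := PySem.List.pyRange 0 ((ref.length : Int)) 1)
        (p := fun i => 1 < (PySem.Set.ofList ((ref :: rest).foldl
              (fun acc strand => acc ++ [PySem.List.pyGetD strand i ' ']) [])).length)
        (a := 0)
      rw [this, zero_add]
      congr 1
      apply List.countP_congr
      intro i _
      rw [hA i]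
      simp only [List.map_cons, decide_eq_true_eq]
      rw [pvSet_card_gt_one]
      constructor
      · rintro ⟨x, hx, hne⟩
        obtain ⟨st, hst, rfl⟩ := List.mem_map.mp hx
        exact ⟨st, hst, hne⟩
      · rintro ⟨st, hst, hne⟩
        exact ⟨PySem.List.pyGetD st i ' ', List.mem_map.mpr ⟨st, hst, rfl⟩, hne⟩
    rw [hAcount]
    -- B side: length of the set of differing positions
    set n : Int := (ref.length : Int) with hn
    set snps : PySem.Set Int :=
      (ref :: rest).foldl (fun s strand =>
        (PySem.List.pyRange 0 n 1).foldl (fun s i =>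
          if PySem.List.pyGetD strand i ' ' ≠ PySem.List.pyGetD ref i ' '
          then PySem.Set.add s i else s) s) PySem.Set.empty with hsnps
    have hmem : ∀ j : Int, j ∈ snps ↔
        j ∈ PySem.List.pyRange 0 n 1 ∧ ∃ x ∈ rest, PySem.List.pyGetD x j ' ' ≠ PySem.List.pyGetD ref j ' ' := by
      intro j
      rw [hsnps]
      rw [pvB_fold_mem ref n (ref :: rest) PySem.Set.empty j]
      simp only [PySem.Set.empty, List.not_mem_nil, false_or, List.mem_cons]
      constructor
      · rintro ⟨st, (rfl | hst), h1, h2⟩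
        · exact absurd rfl h2
        · exact ⟨h1, st, hst, h2⟩
      · rintro ⟨h1, st, hst, h2⟩
        exact ⟨st, Or.inr hst, h1, h2⟩
    have hnd : snps.Nodup := by
      rw [hsnps]
      exact pvB_fold_nodup ref n (ref :: rest) PySem.Set.empty List.nodup_nil
    have hperm : List.Perm snps ((PySem.List.pyRange 0 n 1).filter
        (fun j => decide (∃ x ∈ rest, PySem.List.pyGetD x j ' ' ≠ PySem.List.pyGetD ref j ' '))) := by
      rw [List.perm_ext_iff_of_nodup hnd
        (List.Nodup.filter _ (PySem.List.nodup_pyRange_one 0 n))]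
      intro j
      rw [hmem j, List.mem_filter]
      simp
    have hlen : snps.length = ((PySem.List.pyRange 0 n 1).countP
        (fun j => decide (∃ x ∈ rest, PySem.List.pyGetD x j ' ' ≠ PySem.List.pyGetD ref j ' '))) := by
      rw [hperm.length_eq, ← List.countP_eq_length_filter]
    simp only [hlen]

-- ===== VERDICT (by name: the statement is the Claim_ definition above) =====
theorem findingSNP_spec : Claim_equal_findingSNP := by
  intro d _ _
  unfold Spec_findingSNP
  exact pv_ports_eq d
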